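-- pv_equiv track=rewrite | github.com/nohhha/Baekjoon_study | 프로그래머스/1/42840. 모의고사/모의고사.py | solution
-- ===== SOURCE A (Python) =====
-- def solution(answers):
--     answer = []
--     way1=[1,2,3,4,5]*2000
--     way2=[2,1,2,3,2,4,2,5]*1250
--     way3=[3,3,1,1,2,2,4,4,5,5]*1000
--     ways=[way1, way2, way3]
--     max_cnt=0
--     for i, way in enumerate(ways):
--         way=way[:len(answers)]
--         count = sum(a==b for a, b in zip(way, answers))
--         if count>max_cnt:
--             answer=[]
--             answer.append(i+1)
--             max_cnt=count
--         elif count==max_cnt: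
--             answer.append(i+1)
--
--     return answer
-- ===== SOURCE B (Python) =====
-- def solution(answers):
--     p1 = [1, 2, 3, 4, 5]
--     p2 = [2, 1, 2, 3, 2, 4, 2, 5]
--     p3 = [3, 3, 1, 1, 2, 2, 4, 4, 5, 5]
--     c1 = c2 = c3 = 0
--     # patterns repeat up to the 10000 answers the problem guarantees (as A materializes)
--     for i, a in enumerate(answers[:10000]):
--         if a == p1[i % 5]:
--             c1 += 1
--         if a == p2[i % 8]:
--             c2 += 1
--         if a == p3[i % 10]:
--             c3 += 1
--     m = max(c1, c2, c3)
--     return [k + 1 for k, c in enumerate((c1, c2, c3)) if c == m]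
-- ===== Notes on version B (the rewrite author's own statement) =====
-- stated objective: simpler
-- what changed: One pass over the answers with modulo indexing into the three short base patterns and three integer counters, then max-and-filter selection, instead of materializing three 10000-element repeated lists, scoring each with a zip pass, and tracking the running winner incrementally.
import Mathlib
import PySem

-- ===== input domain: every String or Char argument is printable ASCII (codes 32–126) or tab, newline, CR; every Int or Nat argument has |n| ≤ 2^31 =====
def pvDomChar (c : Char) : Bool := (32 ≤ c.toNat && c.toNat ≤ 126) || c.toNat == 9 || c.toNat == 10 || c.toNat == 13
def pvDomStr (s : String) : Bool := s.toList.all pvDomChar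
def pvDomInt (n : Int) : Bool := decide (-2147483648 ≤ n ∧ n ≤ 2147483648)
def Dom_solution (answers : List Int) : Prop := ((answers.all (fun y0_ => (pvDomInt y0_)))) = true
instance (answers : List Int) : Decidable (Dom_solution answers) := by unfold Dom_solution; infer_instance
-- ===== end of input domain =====

-- B replaces A's three materialized 10000-element pattern lists and per-pattern zip passes
-- by one pass over the answers with modulo indexing and three counters (objective: simpler).

-- ===== PORT A =====
def solution (answers : List Int) : List Int :=
  let way1 := PySem.List.pyRepeat ([1,2,3,4,5] : List Int) 2000
  let way2 := PySem.List.pyRepeat ([2,1,2,3,2,4,2,5] : List Int) 1250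
  let way3 := PySem.List.pyRepeat ([3,3,1,1,2,2,4,4,5,5] : List Int) 1000
  let ways := [way1, way2, way3]
  let st := (PySem.List.enumerate ways 0).foldl
    (fun (st : List Int × Int) iw =>
      let way := PySem.List.slice iw.2 none (some ((answers.length : Int)))
      let count := (way.zip answers).foldl
        (fun s ab => s + (if ab.1 == ab.2 then (1 : Int) else 0)) 0
      if count > st.2 then ([iw.1 + 1], count)
      else if count == st.2 then (st.1 ++ [iw.1 + 1], st.2)
      else st) ([], 0)
  st.1

-- ===== PORT B =====
-- p[i % L] indexing: the enumerate index is ≥ 0, so (i % L).toNat is exact.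
def solution_alt (answers : List Int) : List Int :=
  let p1 : List Int := [1,2,3,4,5]
  let p2 : List Int := [2,1,2,3,2,4,2,5]
  let p3 : List Int := [3,3,1,1,2,2,4,4,5,5]
  let c := (PySem.List.enumerate (PySem.List.slice answers none (some 10000)) 0).foldl
    (fun (c : Int × Int × Int) ia =>
      let c1 := if ia.2 == p1[(ia.1 % 5).toNat]! then c.1 + 1 else c.1
      let c2 := if ia.2 == p2[(ia.1 % 8).toNat]! then c.2.1 + 1 else c.2.1
      let c3 := if ia.2 == p3[(ia.1 % 10).toNat]! then c.2.2 + 1 else c.2.2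
      (c1, c2, c3)) (0, 0, 0)
  let m := max c.1 (max c.2.1 c.2.2)
  ((PySem.List.enumerate [c.1, c.2.1, c.2.2] 0).filter (fun kc => kc.2 == m)).map
    (fun kc => kc.1 + 1)

-- ===== PRECONDITION & SPEC =====
def Spec_solution (answers : List Int) (out : List Int) : Prop := out = solution_alt answers
instance (answers : List Int) (out : List Int) : Decidable (Spec_solution answers out) := by unfold Spec_solution; infer_instance

-- ===== CLAIM (what is proved, stated in full; the proofs are below) =====
def Claim_equal_solution : Prop := ∀ (answers : List Int), Dom_solution answers → Spec_solution answers (solution answers)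

-- ===== LEMMAS AND PROOFS =====

/-- A's per-pattern score as a structural recursion over the two lists. -/
def cz : List Int → List Int → Int
  | [], _ => 0
  | _, [] => 0
  | a :: w, b :: ys => (if a == b then (1 : Int) else 0) + cz w ys

/-- B's per-pattern score: modulo indexing from position `k`. -/
def cm (p : List Int) : Nat → List Int → Int
  | _, [] => 0
  | k, a :: ys => (if a == p[k % p.length]! then (1 : Int) else 0) + cm p (k + 1) ys

theorem cz_nil_right (w : List Int) : cz w [] = 0 := by cases w <;> rfl

theorem foldl_zip_cz (w ys : List Int) (c : Int) :
    (w.zip ys).foldl (fun s ab => s + (if ab.1 == ab.2 then (1 : Int) else 0)) c = c + cz w ys := by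
  induction w generalizing ys c with
  | nil => simp [cz]
  | cons a w ih =>
    cases ys with
    | nil => simp [cz_nil_right]
    | cons b ys =>
      simp only [List.zip_cons_cons, List.foldl_cons, cz]
      rw [ih]; ring

theorem cz_take_left (w ys : List Int) : cz (w.take ys.length) ys = cz w ys := by
  induction w generalizing ys with
  | nil => simp
  | cons a w ih =>
    cases ys with
    | nil => simp [cz_nil_right]
    | cons b ys => simp [cz, ih]

theorem cz_take_right (w ys : List Int) : cz w (ys.take w.length) = cz w ys := by
  induction w generalizing ys with
  | nil => rfl
  | cons a w ih =>
    cases ys with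
    | nil => rfl
    | cons b ys => simp [cz, ih]

theorem getElem!_flatten_replicate (p : List Int) (m k : Nat) (hk : k < m * p.length) :
    ((List.replicate m p).flatten)[k]! = p[k % p.length]! := by
  induction m generalizing k with
  | zero => exact absurd hk (by simp)
  | succ m ih =>
    have hL : 0 < p.length := by
      rcases Nat.eq_zero_or_pos p.length with hl | hl
      · rw [hl] at hk; simp at hk
      · exact hl
    rw [List.replicate_succ, List.flatten_cons]
    by_cases h : k < p.length
    · rw [List.getElem!_eq_getElem?_getD, List.getElem?_append_left h,
        Nat.mod_eq_of_lt h, ← List.getElem!_eq_getElem?_getD]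
    · have h' : p.length ≤ k := Nat.le_of_not_lt h
      rw [List.getElem!_eq_getElem?_getD, List.getElem?_append_right h',
        ← List.getElem!_eq_getElem?_getD, ih (k - p.length) (by
          have h2 : (m + 1) * p.length = m * p.length + p.length := Nat.succ_mul m p.length
          omega), Nat.mod_eq_sub_mod h']

theorem length_flatten_replicate (p : List Int) (m : Nat) :
    ((List.replicate m p).flatten).length = m * p.length := by
  simp [List.length_flatten]

theorem cz_flatten (p : List Int) (m : Nat) (ys : List Int) (k : Nat)
    (h : k + ys.length ≤ m * p.length) :
    cz (((List.replicate m p).flatten).drop k) ys = cm p k ys := by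
  induction ys generalizing k with
  | nil => simp [cz_nil_right, cm]
  | cons a ys ih =>
    have hk : k < ((List.replicate m p).flatten).length := by
      rw [length_flatten_replicate]; simp at h; omega
    rw [List.drop_eq_getElem_cons hk]
    show (if _ == a then (1:Int) else 0) + _ = _
    rw [cm]
    have hg : ((List.replicate m p).flatten)[k] = p[k % p.length]! := by
      have h1 := getElem!_flatten_replicate p m k (by simp at h; omega)
      rwa [List.getElem!_eq_getElem?_getD, List.getElem?_eq_getElem hk, Option.getD_some] at h1
    rw [hg]
    have := ih (k + 1) (by simp at h ⊢; omega)
    rw [this]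
    have hc : (p[k % p.length]! == a) = (a == p[k % p.length]!) := by
      simp only [show ∀ x y : Int, (x == y) = decide (x = y) from fun _ _ => rfl]
      rw [decide_eq_decide]
      exact eq_comm
    rw [hc]

theorem b_fold (ys : List Int) (s : Nat) (c1 c2 c3 : Int) :
    (PySem.List.enumerate ys (s : Int)).foldl
      (fun (c : Int × Int × Int) (ia : Int × Int) =>
        (if ia.2 == ([1,2,3,4,5] : List Int)[(ia.1 % 5).toNat]! then c.1 + 1 else c.1,
         if ia.2 == ([2,1,2,3,2,4,2,5] : List Int)[(ia.1 % 8).toNat]! then c.2.1 + 1 else c.2.1,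
         if ia.2 == ([3,3,1,1,2,2,4,4,5,5] : List Int)[(ia.1 % 10).toNat]! then c.2.2 + 1 else c.2.2))
      (c1, c2, c3)
    = (c1 + cm [1,2,3,4,5] s ys, c2 + cm [2,1,2,3,2,4,2,5] s ys,
       c3 + cm [3,3,1,1,2,2,4,4,5,5] s ys) := by
  induction ys generalizing s c1 c2 c3 with
  | nil => simp [PySem.List.enumerate_nil, cm]
  | cons a ys ih =>
    rw [PySem.List.enumerate_cons]
    have e5 : (((s : Int)) % 5).toNat = s % 5 := by omega
    have e8 : (((s : Int)) % 8).toNat = s % 8 := by omega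
    have e10 : (((s : Int)) % 10).toNat = s % 10 := by omega
    have hs1 : ((s : Int) + 1) = (((s + 1 : Nat)) : Int) := by push_cast; ring
    simp only [List.foldl_cons, e5, e8, e10, hs1, ih, cm]
    refine Prod.ext ?_ (Prod.ext ?_ ?_) <;> simp [List.length] <;> split_ifs <;> ring

-- ===== VERDICT (by name: the statement is the Claim_ definition above) =====
theorem cm_nonneg (p : List Int) (k : Nat) (ys : List Int) : 0 ≤ cm p k ys := by
  induction ys generalizing k with
  | nil => simp [cm]
  | cons a ys ih =>
    simp only [cm]
    have := ih (k + 1)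
    split <;> omega

theorem b_fold0 (ys : List Int) :
    (PySem.List.enumerate ys 0).foldl
      (fun (c : Int × Int × Int) (ia : Int × Int) =>
        (if ia.2 == ([1,2,3,4,5] : List Int)[(ia.1 % 5).toNat]! then c.1 + 1 else c.1,
         if ia.2 == ([2,1,2,3,2,4,2,5] : List Int)[(ia.1 % 8).toNat]! then c.2.1 + 1 else c.2.1,
         if ia.2 == ([3,3,1,1,2,2,4,4,5,5] : List Int)[(ia.1 % 10).toNat]! then c.2.2 + 1 else c.2.2))
      (0, 0, 0)
    = (cm [1,2,3,4,5] 0 ys, cm [2,1,2,3,2,4,2,5] 0 ys, cm [3,3,1,1,2,2,4,4,5,5] 0 ys) := by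
  simpa using b_fold ys 0 0 0 0

theorem cz_flatten0 (p : List Int) (m : Nat) (ys : List Int)
    (h : ys.length ≤ m * p.length) :
    cz ((List.replicate m p).flatten) ys = cm p 0 ys := by
  simpa using cz_flatten p m ys 0 (by omega)

-- ===== VERDICT (by name: the statement is the Claim_ definition above) =====
set_option maxHeartbeats 2000000 in
theorem solution_spec : Claim_equal_solution := by
  intro answers _
  show solution answers = solution_alt answers
  unfold solution solution_alt
  simp only [PySem.List.pyRepeat, PySem.List.slice_to_natCast,
    PySem.List.enumerate_cons, PySem.List.enumerate_nil,
    List.foldl_cons, List.foldl_nil]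
  rw [foldl_zip_cz, foldl_zip_cz, foldl_zip_cz]
  simp only [zero_add, cz_take_left]
  rw [← cz_take_right ((List.replicate (Int.toNat 2000) ([1,2,3,4,5]:List Int)).flatten) answers,
      ← cz_take_right ((List.replicate (Int.toNat 1250) ([2,1,2,3,2,4,2,5]:List Int)).flatten) answers,
      ← cz_take_right ((List.replicate (Int.toNat 1000) ([3,3,1,1,2,2,4,4,5,5]:List Int)).flatten) answers]
  rw [show ((List.replicate (Int.toNat 2000) ([1,2,3,4,5]:List Int)).flatten).length = 10000 by rw [length_flatten_replicate]; decide,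
      show ((List.replicate (Int.toNat 1250) ([2,1,2,3,2,4,2,5]:List Int)).flatten).length = 10000 by rw [length_flatten_replicate]; decide,
      show ((List.replicate (Int.toNat 1000) ([3,3,1,1,2,2,4,4,5,5]:List Int)).flatten).length = 10000 by rw [length_flatten_replicate]; decide]
  have hle : (answers.take 10000).length ≤ 10000 := by simp
  rw [cz_flatten0 _ _ _ (by simp), cz_flatten0 _ _ _ (by simp),
      cz_flatten0 _ _ _ (by simp)]
  have hsl : PySem.List.slice answers none (some 10000) = answers.take 10000 := by
    rw [PySem.List.slice_to answers (by norm_num : (0:Int) ≤ 10000), show ((10000:Int).toNat) = 10000 from rfl]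
  rw [hsl]
  rw [b_fold0]
  obtain ⟨c1, hc1, e1⟩ : ∃ c, 0 ≤ c ∧ cm [1,2,3,4,5] 0 (answers.take 10000) = c :=
    ⟨_, cm_nonneg _ _ _, rfl⟩
  obtain ⟨c2, hc2, e2⟩ : ∃ c, 0 ≤ c ∧ cm [2,1,2,3,2,4,2,5] 0 (answers.take 10000) = c :=
    ⟨_, cm_nonneg _ _ _, rfl⟩
  obtain ⟨c3, hc3, e3⟩ : ∃ c, 0 ≤ c ∧ cm [3,3,1,1,2,2,4,4,5,5] 0 (answers.take 10000) = c :=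
    ⟨_, cm_nonneg _ _ _, rfl⟩
  rw [e1, e2, e3]
  simp only [PySem.List.enumerate_cons, PySem.List.enumerate_nil, List.filter_cons,
    List.filter_nil, List.map_cons, List.map_nil, beq_iff_eq, gt_iff_lt]
  split_ifs <;> simp only [List.map_cons, List.map_nil, List.nil_append, List.cons_append] <;> first | rfl | omega | (exfalso; omega) | norm_num
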